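-- pv_equiv track=rewrite | github.com/moerbeke/aoc-2015 | aoc08.py | encode_str
-- ===== SOURCE A (Python) =====
-- def encode_str(scode):
--     s = '"'
--     i = 0
--     while i < len(scode):
--         c = scode[i]
--         if c == '"':
--             s += '\\"'
--         elif c == '\\':
--             s += '\\\\'
--         else:
--             s += c
--         i += 1
--     s += '"'
--     return s
-- ===== SOURCE B (Python) =====
-- def encode_str(scode):
--     return '"' + scode.replace('\\', '\\\\').replace('"', '\\"') + '"'
-- ===== Notes on version B (the rewrite author's own statement) =====
-- stated objective: faster
-- what changed: Replaces the index-driven while loop with per-character branching string concatenation by a single expression: two whole-string str.replace passes (backslashes first, then quotes) concatenated between quotes.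
import Mathlib
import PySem

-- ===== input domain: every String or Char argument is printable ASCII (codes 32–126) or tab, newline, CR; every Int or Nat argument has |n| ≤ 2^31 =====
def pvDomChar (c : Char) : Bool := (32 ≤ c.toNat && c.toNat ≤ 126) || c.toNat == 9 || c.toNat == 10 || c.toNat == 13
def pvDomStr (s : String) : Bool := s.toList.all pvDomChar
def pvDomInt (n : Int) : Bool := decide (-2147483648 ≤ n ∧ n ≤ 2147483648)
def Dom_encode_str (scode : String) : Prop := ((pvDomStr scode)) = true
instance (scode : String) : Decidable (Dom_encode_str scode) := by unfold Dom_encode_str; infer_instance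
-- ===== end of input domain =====

-- B replaces A's index-driven per-character loop by two whole-string replace passes
-- (backslashes first, then quotes) in one expression, avoiding repeated string concatenation; objective: faster.

-- ===== PORT A =====
-- A builds the result left to right, one character at a time (while loop over indices,
-- appending the escape of each character); ported as a fold over the character list.
def encode_str (scode : String) : String :=
  let s : List Char :=
    scode.toList.foldl (fun acc c =>
      if c = '"' then acc ++ ['\\', '"']
      else if c = '\\' then acc ++ ['\\', '\\']
      else acc ++ [c]) ['"']
  String.ofList (s ++ ['"'])

-- ===== PORT B =====
-- '"' + scode.replace('\\','\\\\').replace('"','\\"') + '"'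
def encode_str_alt (scode : String) : String :=
  String.ofList ('"' ::
    PySem.Chars.replace (PySem.Chars.replace scode.toList ['\\'] ['\\', '\\'])
      ['"'] ['\\', '"'] ++ ['"'])

-- ===== PRECONDITION & SPEC =====
def Spec_encode_str (scode : String) (out : String) : Prop := out = encode_str_alt scode
instance (scode : String) (out : String) : Decidable (Spec_encode_str scode out) := by unfold Spec_encode_str; infer_instance

-- ===== CLAIM (what is proved, stated in full; the proofs are below) =====
def Claim_equal_encode_str : Prop := ∀ (scode : String), Dom_encode_str scode → Spec_encode_str scode (encode_str scode)

-- ===== LEMMAS AND PROOFS =====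

theorem flatMap_comp {α : Type} (f g : α → List α) (l : List α) :
    (l.flatMap f).flatMap g = l.flatMap (fun c => (f c).flatMap g) := by
  induction l with
  | nil => rfl
  | cons x t ih => simp [List.flatMap_cons, List.flatMap_append, ih]

theorem replace_go_single (a : Char) (new : List Char) :
    ∀ (fuel : Nat) (l acc : List Char), l.length ≤ fuel →
      PySem.Chars.replace.go [a] new fuel l acc =
        acc.reverse ++ l.flatMap (fun c => if c = a then new else [c]) := by
  intro fuel
  induction fuel with
  | zero =>
    intro l acc h
    have : l = [] := List.eq_nil_of_length_eq_zero (Nat.le_zero.mp h)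
    subst this
    simp [PySem.Chars.replace.go]
  | succ n ih =>
    intro l acc h
    cases l with
    | nil => simp [PySem.Chars.replace.go]
    | cons c t =>
      by_cases hc : c = a
      · subst hc
        rw [PySem.Chars.replace.go]
        simp only [List.isPrefixOf, BEq.rfl, Bool.true_and, if_true, List.length_cons,
          List.length_nil, List.drop_succ_cons, List.drop_zero]
        rw [ih t (new.reverse ++ acc) (by simpa using Nat.le_of_succ_le_succ h)]
        simp
      · rw [PySem.Chars.replace.go]
        have hpre : [a].isPrefixOf (c :: t) = false := by
          simp [List.isPrefixOf, beq_eq_false_iff_ne]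
          exact fun hh => hc hh.symm
        rw [hpre]
        simp only [Bool.false_eq_true, if_false]
        rw [ih t (c :: acc) (by simpa using Nat.le_of_succ_le_succ h)]
        simp [hc]

-- Replacing a single-character pattern is a flatMap over the characters.
theorem replace_single (a : Char) (new : List Char) (l : List Char) :
    PySem.Chars.replace l [a] new = l.flatMap (fun c => if c = a then new else [c]) := by
  rw [PySem.Chars.replace]
  simp only [List.isEmpty_cons, if_false, Bool.false_eq_true]
  simpa using replace_go_single a new l.length l [] (le_refl _)

-- ===== VERDICT (by name: the statement is the Claim_ definition above) =====
theorem encode_str_spec : Claim_equal_encode_str := by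
  intro scode _
  unfold Spec_encode_str encode_str encode_str_alt
  have hfun : (fun (acc : List Char) (c : Char) =>
      if c = '\"' then acc ++ ['\\', '\"']
      else if c = '\\' then acc ++ ['\\', '\\']
      else acc ++ [c]) =
      (fun (acc : List Char) (c : Char) => acc ++
        (if c = '\"' then ['\\', '\"'] else if c = '\\' then ['\\', '\\'] else [c])) := by
    funext acc c
    split_ifs <;> rfl
  have hesc : (fun (c : Char) =>
      if c = '\"' then ['\\', '\"'] else if c = '\\' then ['\\', '\\'] else [c]) =
      (fun (c : Char) => (if c = '\\' then ['\\', '\\'] else [c]).flatMap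
        (fun c => if c = '\"' then ['\\', '\"'] else [c])) := by
    funext c
    by_cases h1 : c = '\"'
    · simp [h1]
    · by_cases h2 : c = '\\' <;> simp [h1, h2]
  simp only [hfun]
  rw [PySem.List.foldl_append_eq_flatMap, replace_single, replace_single, flatMap_comp]
  simp only [hesc]
  simp
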